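-- pv_equiv track=rewrite | github.com/doggydino/Mono-Alphabetic-Substitution-Cipher | decryption.py | look_for_digrams
-- ===== SOURCE A (Python) =====
-- def look_for_digrams(ciphertext:str):
--     storage = dict()
--     for index, letter in enumerate(ciphertext):
--         if index == len(ciphertext) - 2:
--             if len(ciphertext) - index != 2:
--                 continue
--             storage[ciphertext[index: index + 2]] = storage.get(ciphertext[index:index + 2], 0) + 1
--             storage = dict(filter(lambda i:i[1] > 1, storage.items()))
--             return storage
--         storage[ciphertext[index: index + 2]] = storage.get(ciphertext[index:index + 2], 0) + 1
-- ===== SOURCE B (Python) =====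
-- def look_for_digrams(ciphertext: str):
--     digrams = [ciphertext[i:i + 2] for i in range(len(ciphertext) - 1)]
--     return {d: digrams.count(d) for d in dict.fromkeys(digrams) if digrams.count(d) > 1}
-- ===== Notes on version B (the rewrite author's own statement) =====
-- stated objective: alternative
-- what changed: B keeps no running counter at all: it materialises the digram list once and builds the result with a single dict comprehension over the distinct digrams (dict.fromkeys), counting each one by a digrams.count scan of the whole list, replacing A's one-pass incrementing dict with its per-iteration sentinel index test, dead-code continue and mid-loop filter(lambda)+early return; Pre_ excludes strings of length < 2, on which A falls off the loop and returns None (not a dict) while B returns {}.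
-- outside the precondition, e.g. on look_for_digrams(''): A returns None, B returns {}; on look_for_digrams('a'): A returns None, B returns {}
import Mathlib
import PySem

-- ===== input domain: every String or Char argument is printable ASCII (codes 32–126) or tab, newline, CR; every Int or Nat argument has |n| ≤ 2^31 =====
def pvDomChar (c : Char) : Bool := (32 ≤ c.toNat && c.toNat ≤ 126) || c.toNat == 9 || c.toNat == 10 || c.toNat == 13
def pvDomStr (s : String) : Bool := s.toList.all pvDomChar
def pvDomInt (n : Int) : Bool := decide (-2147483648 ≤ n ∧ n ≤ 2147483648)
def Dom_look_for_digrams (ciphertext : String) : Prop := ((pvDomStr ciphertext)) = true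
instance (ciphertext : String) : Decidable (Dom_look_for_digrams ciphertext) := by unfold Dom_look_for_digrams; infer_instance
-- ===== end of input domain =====

-- B keeps no running counter: it builds the digram list once and produces the result with one
-- dict comprehension over the distinct digrams, counting each by a digrams.count scan, replacing A's
-- incrementing dict with its sentinel index test, dead 'continue' and mid-loop filter + return.

-- ===== PORT A =====
-- the for-loop with its early return: recursion over enumerate(ciphertext); none = fell off the loop (Python returns None)
def lfdGo (s : String) : List (Int × Char) → PySem.Dict String Int → Option (List (String × Int))
  | [], _ => none
  | (index, _letter) :: rest, storage =>
    if index = PySem.Str.len s - 2 then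
      if PySem.Str.len s - index ≠ 2 then lfdGo s rest storage
      else
        some (((storage.insert (PySem.Str.slice s (some index) (some (index + 2)))
            (storage.getD (PySem.Str.slice s (some index) (some (index + 2))) 0 + 1)).items).filter
          (fun i => decide (i.2 > 1)))
    else
      lfdGo s rest (storage.insert (PySem.Str.slice s (some index) (some (index + 2)))
        (storage.getD (PySem.Str.slice s (some index) (some (index + 2))) 0 + 1))

def look_for_digrams (ciphertext : String) : List (String × Int) :=
  (lfdGo ciphertext (PySem.List.enumerate ciphertext.toList 0) PySem.Dict.empty).getD []

-- ===== PORT B =====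
def look_for_digrams_alt (ciphertext : String) : List (String × Int) :=
  let digrams := (PySem.List.pyRange 0 (PySem.Str.len ciphertext - 1) 1).map
    (fun i => PySem.Str.slice ciphertext (some i) (some (i + 2)))
  (((PySem.List.dedup digrams).foldl
      (fun d x => if (PySem.List.count digrams x : Int) > 1
        then d.insert x (PySem.List.count digrams x : Int) else d)
      PySem.Dict.empty).items)

-- ===== PRECONDITION & SPEC =====
-- Pre_ excludes strings of length < 2: there A's loop never reaches its return statement, so A
-- returns None rather than a dict (B returns the empty dict there).
def Pre_look_for_digrams (ciphertext : String) : Prop := 2 ≤ ciphertext.toList.length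
instance (ciphertext : String) : Decidable (Pre_look_for_digrams ciphertext) := by unfold Pre_look_for_digrams; infer_instance
def pvWitness_look_for_digrams : String := "abab"

def Spec_look_for_digrams (ciphertext : String) (out : List (String × Int)) : Prop := out = look_for_digrams_alt ciphertext
instance (ciphertext : String) (out : List (String × Int)) : Decidable (Spec_look_for_digrams ciphertext out) := by unfold Spec_look_for_digrams; infer_instance

-- ===== CLAIM (what is proved, stated in full; the proofs are below) =====
def Claim_equal_look_for_digrams : Prop := ∀ (ciphertext : String), Dom_look_for_digrams ciphertext → Pre_look_for_digrams ciphertext → Spec_look_for_digrams ciphertext (look_for_digrams ciphertext)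

-- ===== LEMMAS AND PROOFS =====

-- A's loop, entered at index j with j + 2 ≤ n, returns the filtered items of the dict obtained by
-- counting the slices at indices j, j+1, …, n-2 on top of the dict d.
lemma lfdGo_eq (s : String) : ∀ (m : List Char) (j : Nat) (d : PySem.Dict String Int),
    m = s.toList.drop j → j + 2 ≤ s.toList.length →
    lfdGo s (PySem.List.enumerate m (j : Int)) d =
      some (((((List.range' j (s.toList.length - 1 - j)).map
          (fun (i : Nat) => PySem.Str.slice s (some (i : Int)) (some ((i : Int) + 2)))).foldl
          (fun d x => d.insert x (d.getD x 0 + 1)) d).items).filter (fun p => decide (p.2 > 1))) := by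
  intro m
  induction m with
  | nil =>
    intro j d hm hj
    exfalso
    have hsl : s.toList.length = s.length := String.length_toList
    have := congrArg List.length hm
    simp [List.length_drop] at this
    omega
  | cons c m' ih =>
    intro j d hm hj
    have hlenI : PySem.Str.len s = (s.toList.length : Int) := by simp [PySem.Str.len_eq]
    have hm' : m' = s.toList.drop (j + 1) := by
      have h := congrArg List.tail hm
      simpa [List.tail_drop] using h
    rw [PySem.List.enumerate_cons]
    simp only [lfdGo]
    by_cases hje : j = s.toList.length - 2
    · have hcond : (j : Int) = PySem.Str.len s - 2 := by rw [hlenI]; omega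
      have hrange : s.toList.length - 1 - j = 1 := by omega
      rw [if_pos hcond, if_neg (by rw [hlenI]; omega), hrange]
      simp [List.range']
    · have hcond : ¬ ((j : Int) = PySem.Str.len s - 2) := by rw [hlenI]; omega
      have hcast : ((j : Int) + 1) = ((j + 1 : Nat) : Int) := by push_cast; ring
      have hr : s.toList.length - 1 - j = (s.toList.length - 1 - (j + 1)) + 1 := by omega
      rw [if_neg hcond, hcast, ih (j + 1) _ hm' (by omega), hr, List.range'_succ]
      simp

-- a fold of inserts whose value depends only on the key: items = first occurrences paired with values
lemma items_foldl_insert_const (v : String → Int) (M : List String) :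
    (M.foldl (fun d x => d.insert x (v x)) PySem.Dict.empty).items =
      (PySem.Set.ofList M).map (fun k => (k, v k)) := by
  induction M using List.reverseRecOn with
  | nil => rfl
  | append_singleton M x ih =>
    rw [List.foldl_append, List.foldl_cons, List.foldl_nil]
    have hofl : PySem.Set.ofList (M ++ [x]) = PySem.Set.add (PySem.Set.ofList M) x := by
      simp [PySem.Set.ofList_eq_foldl, List.foldl_append]
    have hkeys : (M.foldl (fun d x => d.insert x (v x)) PySem.Dict.empty).keys = PySem.Set.ofList M := by
      simp only [PySem.Dict.keys, ih, List.map_map]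
      exact List.map_id _
    by_cases hmem : x ∈ PySem.Set.ofList M
    · have hmemM : x ∈ M := (PySem.Set.mem_ofList M x).mp hmem
      have hcont : (M.foldl (fun d x => d.insert x (v x)) PySem.Dict.empty).contains x = true := by
        rw [PySem.Dict.contains_eq_decide_mem_keys, hkeys]; simpa
      rw [PySem.Dict.items_insert_of_contains _ _ hcont, ih, hofl]
      have hadd : PySem.Set.add (PySem.Set.ofList M) x = PySem.Set.ofList M := by
        simp [PySem.Set.add, hmem]
      rw [hadd, List.map_map]
      apply List.map_congr_left
      intro k _
      by_cases hk : k = x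
      · subst hk; simp
      · simp [Function.comp, hk]
    · have hmemM : x ∉ M := fun h => hmem ((PySem.Set.mem_ofList M x).mpr h)
      have hcont : (M.foldl (fun d x => d.insert x (v x)) PySem.Dict.empty).contains x = false := by
        rw [PySem.Dict.contains_eq_decide_mem_keys, hkeys]; simpa
      rw [PySem.Dict.items_insert_of_not_contains _ _ hcont, ih, hofl]
      have hadd : PySem.Set.add (PySem.Set.ofList M) x = PySem.Set.ofList M ++ [x] := by
        simp [PySem.Set.add, hmem]
      rw [hadd]
      simp


-- ===== VERDICT (by name: the statement is the Claim_ definition above) =====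
theorem look_for_digrams_spec : Claim_equal_look_for_digrams := by
  intro s _hdom hpre
  unfold Spec_look_for_digrams look_for_digrams look_for_digrams_alt
  have hpre' : (2 : Nat) ≤ s.toList.length := hpre
  have h0 : s.toList = s.toList.drop 0 := by simp
  have hmain := lfdGo_eq s s.toList 0 PySem.Dict.empty h0 (by omega)
  rw [Nat.cast_zero] at hmain
  rw [hmain, Option.getD_some]
  have hlen : PySem.Str.len s = (s.toList.length : Int) := by simp [PySem.Str.len_eq]
  have hcast : PySem.Str.len s - 1 = ((s.toList.length - 1 : Nat) : Int) := by rw [hlen]; omega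
  rw [PySem.Dict.foldl_insert_getD_add_one_eq_counter, PySem.Dict.items_counter, List.filter_map]
  simp only [hcast, PySem.List.pyRange_zero_natCast, List.map_map, ← List.range_eq_range']
  rw [PySem.List.foldl_ite_eq_foldl_filter]
  rw [items_foldl_insert_const]
  rw [PySem.List.dedup_eq_ofList, PySem.Set.ofList_eq_self_of_nodup _ (List.Nodup.filter _ (PySem.Set.nodup_ofList _))]
  simp [PySem.List.count_eq, Function.comp_def, String.length_toList]
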